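-- pv_equiv track=rewrite | github.com/ValeriaBotalova/PythonLab1 | Task3/task.py | solution
-- ===== SOURCE A (Python) =====
-- def solution(sentence):
--     allDigit = []
--     digit = 0
--     evenDigit = 0
--     for i in sentence:
--         if i != " ":
--             digit += 1
--         else:
--             allDigit.append(digit)
--             digit = 0
--     allDigit.append(digit)
--     for j in allDigit:
--         if j%2 == 0:
--             evenDigit += 1
--     return evenDigit
-- ===== SOURCE B (Python) =====
-- def solution(sentence):
--     return len([w for w in sentence.split(" ") if len(w) % 2 == 0])
-- ===== Notes on version B (the rewrite author's own statement) =====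
-- stated objective: idiomatic
-- what changed: Replaces A's character-by-character length accumulation into an explicit list plus a second even-counting pass with a single str.split on the space separator followed by counting the even-length chunks.
import Mathlib
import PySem

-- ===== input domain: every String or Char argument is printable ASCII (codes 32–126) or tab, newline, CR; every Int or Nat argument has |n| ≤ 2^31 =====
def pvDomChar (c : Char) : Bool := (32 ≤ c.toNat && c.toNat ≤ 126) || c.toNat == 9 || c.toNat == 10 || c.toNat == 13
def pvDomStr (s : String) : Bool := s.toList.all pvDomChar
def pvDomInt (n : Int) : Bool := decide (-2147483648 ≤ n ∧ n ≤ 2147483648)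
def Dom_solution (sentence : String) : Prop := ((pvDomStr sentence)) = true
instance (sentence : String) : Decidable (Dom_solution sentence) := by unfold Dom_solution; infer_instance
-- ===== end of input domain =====

-- B replaces A's char-by-char length accumulation + second even-counting pass with one
-- split(" ") followed by counting the even-length chunks (idiomatic; same return value).


-- ===== PORT A =====
-- literal transliteration: accumulate chunk lengths, then count the even ones
def solution (sentence : String) : Int :=
  let st := sentence.toList.foldl
    (fun (p : List Int × Int) i => if i ≠ ' ' then (p.1, p.2 + 1) else (p.1 ++ [p.2], 0))
    ([], 0)
  let allDigit := st.1 ++ [st.2]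
  allDigit.foldl (fun acc j => if PySem.Int.mod j 2 == 0 then acc + 1 else acc) 0

-- ===== PORT B =====
-- sentence.split(" ") is ported as List.splitOn ' ' on the char list (keeps empty chunks)
def solution_alt (sentence : String) : Int :=
  ((sentence.toList.splitOn ' ').filter (fun w => w.length % 2 == 0)).length

-- ===== PRECONDITION & SPEC =====
def Spec_solution (sentence : String) (out : Int) : Prop := out = solution_alt sentence
instance (sentence : String) (out : Int) : Decidable (Spec_solution sentence out) := by unfold Spec_solution; infer_instance

-- ===== CLAIM (what is proved, stated in full; the proofs are below) =====
def Claim_equal_solution : Prop := ∀ (sentence : String), Dom_solution sentence → Spec_solution sentence (solution sentence)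

-- ===== LEMMAS AND PROOFS =====

theorem splitOnP_ne_nil' {α : Type} [DecidableEq α] (p : α → Bool) (cs : List α) :
    cs.splitOnP p ≠ [] := by
  induction cs with
  | nil => simp [List.splitOnP_nil]
  | cons c cs ih =>
    rw [List.splitOnP_cons]
    split_ifs
    · simp
    · cases h : cs.splitOnP p with
      | nil => exact absurd h ih
      | cons w ws => simp

theorem splitOn_cons' (c : Char) (cs : List Char) :
    (c :: cs).splitOn ' ' =
      if c = ' ' then [] :: cs.splitOn ' '
      else (cs.splitOn ' ').modifyHead (List.cons c) := by
  simp [List.splitOn, List.splitOnP_cons]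

theorem fold_lens (cs : List Char) (acc : List Int) (d : Int) :
    (cs.foldl
      (fun (p : List Int × Int) i => if i ≠ ' ' then (p.1, p.2 + 1) else (p.1 ++ [p.2], 0))
      (acc, d)).1 ++
    [(cs.foldl
      (fun (p : List Int × Int) i => if i ≠ ' ' then (p.1, p.2 + 1) else (p.1 ++ [p.2], 0))
      (acc, d)).2] =
    acc ++ ((cs.splitOn ' ').map (fun w => (w.length : Int))).modifyHead (fun h => d + h) := by
  induction cs generalizing acc d with
  | nil => simp [List.splitOn, List.splitOnP_nil]
  | cons c cs ih =>
    rw [splitOn_cons']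
    by_cases hc : c = ' '
    · subst hc
      rw [show (' ' :: cs).foldl
          (fun (p : List Int × Int) i => if i ≠ ' ' then (p.1, p.2 + 1) else (p.1 ++ [p.2], 0))
          (acc, d) = cs.foldl
          (fun (p : List Int × Int) i => if i ≠ ' ' then (p.1, p.2 + 1) else (p.1 ++ [p.2], 0))
          (acc ++ [d], 0) from by simp]
      rw [ih]
      cases h : cs.splitOn ' ' with
      | nil => exact absurd (by simpa [List.splitOn] using h) (splitOnP_ne_nil' (· == ' ') cs)
      | cons w ws => simp
    · rw [show (c :: cs).foldl
          (fun (p : List Int × Int) i => if i ≠ ' ' then (p.1, p.2 + 1) else (p.1 ++ [p.2], 0))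
          (acc, d) = cs.foldl
          (fun (p : List Int × Int) i => if i ≠ ' ' then (p.1, p.2 + 1) else (p.1 ++ [p.2], 0))
          (acc, d + 1) from by simp [hc]]
      rw [ih, if_neg hc]
      cases h : cs.splitOn ' ' with
      | nil => exact absurd (by simpa [List.splitOn] using h) (splitOnP_ne_nil' (· == ' ') cs)
      | cons w ws =>
        simp only [List.modifyHead_cons, List.map_cons, List.length_cons]
        congr 2
        push_cast
        ring

theorem fold_count (ws : List (List Char)) (a : Int) :
    (ws.map (fun w => (w.length : Int))).foldl
      (fun acc j => if PySem.Int.mod j 2 == 0 then acc + 1 else acc) a =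
    a + (ws.filter (fun w => w.length % 2 == 0)).length := by
  induction ws generalizing a with
  | nil => simp
  | cons w ws ih =>
    simp only [List.map_cons, List.foldl_cons, List.filter_cons]
    by_cases h : w.length % 2 = 0
    · rw [ih]
      simp [h]
      omega
    · have h1 : w.length % 2 = 1 := by omega
      rw [ih]
      simp [h1]
      omega

-- ===== VERDICT (by name: the statement is the Claim_ definition above) =====
theorem solution_spec : Claim_equal_solution := by
  intro sentence _
  unfold Spec_solution solution solution_alt
  dsimp only
  rw [fold_lens sentence.toList [] 0]
  cases h : sentence.toList.splitOn ' ' with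
  | nil => exact absurd h (by simpa [List.splitOn] using splitOnP_ne_nil' (· == ' ') sentence.toList)
  | cons w ws =>
    simp only [List.map_cons, List.modifyHead_cons, zero_add, List.nil_append]
    rw [show ((w.length : Int) :: ws.map (fun w => (w.length : Int))) =
        ((w :: ws).map (fun w => (w.length : Int))) from rfl]
    rw [fold_count]
    simp
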